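-- pv_equiv track=rewrite | github.com/scash231/ReelsConverter | backend/uploader.py | _sanitize_tags
-- ===== SOURCE A (Python) =====
-- def _sanitize_tags(tags: list[str]) -> list[str]:
--     """YouTube constraints: each tag ≤ 30 chars, total across all tags ≤ 500 chars."""
--     result, total = [], 0
--     for tag in tags:
--         tag = tag.strip().lstrip("#")
--         if not tag or len(tag) > 30:
--             continue
--         if total + len(tag) > 500:
--             break
--         result.append(tag)
--         total += len(tag)
--     return result
-- ===== SOURCE B (Python) =====
-- def _sanitize_tags(tags: list[str]) -> list[str]:
--     """YouTube constraints: each tag <= 30 chars, total across all tags <= 500 chars.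
--     Two-pass variant: clean+filter first, then cut at the first over-budget prefix sum."""
--     cleaned = [t for tag in tags if (t := tag.strip().lstrip("#")) and len(t) <= 30]
--     cums, c = [], 0
--     for t in cleaned:
--         c += len(t)
--         cums.append(c)
--     keep = 0
--     while keep < len(cleaned) and cums[keep] <= 500:
--         keep += 1
--     return cleaned[:keep]
-- ===== Notes on version B (the rewrite author's own statement) =====
-- stated objective: alternative
-- what changed: Replaces A's single fused loop with running total and break by a two-pass pipeline: a comprehension that cleans and filters tags, a prefix-sum table of their lengths, and a slice at the first prefix sum exceeding 500.
import Mathlib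
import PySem

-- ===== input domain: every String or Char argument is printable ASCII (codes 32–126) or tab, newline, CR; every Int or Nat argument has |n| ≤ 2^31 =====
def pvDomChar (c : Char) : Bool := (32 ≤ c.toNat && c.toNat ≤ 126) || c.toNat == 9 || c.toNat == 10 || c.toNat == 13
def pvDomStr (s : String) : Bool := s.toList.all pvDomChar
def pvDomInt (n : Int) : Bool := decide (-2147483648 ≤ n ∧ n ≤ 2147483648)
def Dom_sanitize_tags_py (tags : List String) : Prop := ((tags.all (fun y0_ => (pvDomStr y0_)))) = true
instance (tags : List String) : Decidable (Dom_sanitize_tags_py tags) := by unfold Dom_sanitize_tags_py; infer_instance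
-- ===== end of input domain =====

-- B replaces A's fused loop (running total + break) by a two-pass pipeline: clean/filter, prefix sums, slice at the budget; same values, alternative structure.

-- ===== PORT A =====
-- tag.strip().lstrip("#"): strip is PySem.Chars.strip; lstrip("#") is exactly dropping leading '#' chars (ported by hand, exact).
def pvClean (tag : String) : List Char :=
  (PySem.Chars.strip tag.toList).dropWhile (· == '#')

-- the for-loop of A, with `break` as an early return of the accumulated result
def pvGoA : List String → List String → Nat → List String
  | [], result, _ => result
  | tag :: rest, result, total =>
    let t := pvClean tag
    if t.isEmpty || t.length > 30 then pvGoA rest result total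
    else if total + t.length > 500 then result
    else pvGoA rest (result ++ [String.ofList t]) (total + t.length)

def sanitize_tags_py (tags : List String) : List String :=
  pvGoA tags [] 0

-- ===== PORT B =====
-- prefix sums (the cums/c loop of Source B)
def pvAccum : Nat → List Nat → List Nat
  | _, [] => []
  | c, x :: xs => (c + x) :: pvAccum (c + x) xs

def pvCleanOpt (tag : String) : Option String :=
  let t := pvClean tag
  if !t.isEmpty && t.length ≤ 30 then some (String.ofList t) else none

def sanitize_tags_py_alt (tags : List String) : List String :=
  let cleaned := tags.filterMap pvCleanOpt
  let cums := pvAccum 0 (cleaned.map (fun t => t.toList.length))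
  -- the while-loop counts how many leading prefix sums are ≤ 500
  cleaned.take (cums.takeWhile (fun c => c ≤ 500)).length

-- ===== PRECONDITION & SPEC =====
def Spec_sanitize_tags_py (tags : List String) (out : List String) : Prop := out = sanitize_tags_py_alt tags
instance (tags : List String) (out : List String) : Decidable (Spec_sanitize_tags_py tags out) := by unfold Spec_sanitize_tags_py; infer_instance

-- ===== CLAIM (what is proved, stated in full; the proofs are below) =====
def Claim_equal_sanitize_tags_py : Prop := ∀ (tags : List String), Dom_sanitize_tags_py tags → Spec_sanitize_tags_py tags (sanitize_tags_py tags)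

-- ===== LEMMAS AND PROOFS =====

theorem pvGoA_eq (tags : List String) : ∀ (result : List String) (total : Nat),
    pvGoA tags result total =
      result ++ ((tags.filterMap pvCleanOpt).take
        ((pvAccum total ((tags.filterMap pvCleanOpt).map (fun t => t.toList.length))).takeWhile
          (fun c => c ≤ 500)).length) := by
  induction tags with
  | nil => intro result total; simp [pvGoA]
  | cons tag rest ih =>
    intro result total
    by_cases hval : (pvClean tag).isEmpty || (pvClean tag).length > 30
    · have hopt : pvCleanOpt tag = none := by
        unfold pvCleanOpt
        rcases Bool.or_eq_true_iff.mp hval with h | h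
        · simp [h]
        · simp [Nat.not_le.mpr (of_decide_eq_true h)]
      simp only [pvGoA, hval, if_pos, List.filterMap_cons, hopt]
      exact ih result total
    · have hopt : pvCleanOpt tag = some (String.ofList (pvClean tag)) := by
        unfold pvCleanOpt
        simp only [Bool.or_eq_true, not_or] at hval
        simp [hval.1, Nat.not_lt.mp (by simpa using hval.2)]
      have hlen : (String.ofList (pvClean tag)).toList.length = (pvClean tag).length := by
        simp
      by_cases hbud : total + (pvClean tag).length > 500
      · have hnot : ¬ (total + (pvClean tag).length ≤ 500) := by omega
        simp only [pvGoA, hval, hbud, if_pos, List.filterMap_cons, hopt,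
          List.map_cons, pvAccum, List.takeWhile]
        simp [hnot]
      · have hle : total + (pvClean tag).length ≤ 500 := by omega
        simp only [pvGoA, hval, hbud, List.filterMap_cons, hopt,
          List.map_cons, pvAccum, List.takeWhile]
        simp only [hlen, decide_eq_true hle, List.length_cons, List.take_succ_cons]
        rw [ih (result ++ [String.ofList (pvClean tag)]) (total + (pvClean tag).length)]
        simp

-- ===== VERDICT (by name: the statement is the Claim_ definition above) =====
theorem sanitize_tags_py_spec : Claim_equal_sanitize_tags_py := by
  intro tags _
  unfold Spec_sanitize_tags_py sanitize_tags_py sanitize_tags_py_alt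
  simpa using pvGoA_eq tags [] 0
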